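-- pv_equiv track=rewrite | github.com/roadview-project/No_reference_image_and_point_cloud_quality | image-quality-assessment/distortion/corrupt_images.py | generate_n_configs
-- ===== SOURCE A (Python) =====
-- def generate_n_configs(config, n):
--     """
--     Assumes that every variable in config has 1 or n possible values.
--     Generates n configs.
--     """
--     dicts = [{} for _ in range(n)]
--     for k, v in config.items():
--         for i in range(n):
--             if len(v) == 1:
--                 dicts[i][k] = v[0]
--             else:
--                 dicts[i][k] = v[i]
--     return dicts
-- ===== SOURCE B (Python) =====
-- def generate_n_configs(config, n):
--     keys = list(config)
--     if not keys:
--         return [{} for _ in range(n)]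
--     m = max(n, 0)
--     rows = [v * m if len(v) == 1 else v[:m] for v in config.values()]
--     return [dict(zip(keys, col)) for col in zip(*rows)]
-- ===== Notes on version B (the rewrite author's own statement) =====
-- stated objective: alternative
-- what changed: A fills n dicts with a nested key-by-key, index-by-index double loop of per-dict assignments; B builds a table of full-length-n rows (broadcasting singleton values), transposes it column-by-column (zip(*rows)) and constructs each output dict in one shot with dict(zip(keys, column)).
-- outside the precondition, e.g. on generate_n_configs({'a': [1, 2]}, 3): A raises IndexError, B returns [{'a': 1}, {'a': 2}]
import Mathlib
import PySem

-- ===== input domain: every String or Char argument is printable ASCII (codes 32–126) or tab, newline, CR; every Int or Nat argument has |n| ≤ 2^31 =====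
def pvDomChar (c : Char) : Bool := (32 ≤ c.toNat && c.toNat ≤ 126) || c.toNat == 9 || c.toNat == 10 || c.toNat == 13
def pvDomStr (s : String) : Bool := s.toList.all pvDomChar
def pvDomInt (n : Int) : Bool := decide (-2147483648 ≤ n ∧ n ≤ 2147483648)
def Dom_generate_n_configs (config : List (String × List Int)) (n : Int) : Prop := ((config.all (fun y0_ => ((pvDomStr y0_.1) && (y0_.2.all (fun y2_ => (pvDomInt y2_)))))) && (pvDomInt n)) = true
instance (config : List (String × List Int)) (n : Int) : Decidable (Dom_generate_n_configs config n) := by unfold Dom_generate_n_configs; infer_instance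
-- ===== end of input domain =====

-- B builds the n output dicts by transposing a table of length-n rows instead of A's nested
-- per-index assignment loops; same return value on Pre_ (objective: alternative decomposition).

-- ===== PORT A =====
def generate_n_configs (config : List (String × List Int)) (n : Int) : List (List (String × Int)) :=
  let dicts : List (PySem.Dict String Int) := (PySem.List.pyRange 0 n 1).map (fun _ => PySem.Dict.empty)
  let final := config.foldl (fun ds kv =>
    (PySem.List.pyRange 0 n 1).foldl (fun ds i =>
      -- dicts[i][k] = v[0] / v[i]  (v[i] in range is guaranteed by Pre_; total form uses getD 0)
      let d := PySem.List.pyGetD ds i PySem.Dict.empty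
      let d' := if kv.2.length = 1
        then d.insert kv.1 ((PySem.List.pyGet? kv.2 0).getD 0)
        else d.insert kv.1 ((PySem.List.pyGet? kv.2 i).getD 0)
      PySem.List.pySetD ds i d') ds) dicts
  final.map (fun d => d.items)

-- ===== PORT B =====
-- v * m (Python list repetition, exact for m = max n 0 ≥ 0) / v[:m]
def pvRow (m : Int) (v : List Int) : List Int :=
  if v.length = 1 then (List.replicate m.toNat v).flatten
  else PySem.List.slice v none (some m)

-- zip(*rows): one column per index below the minimum row length (exact for the nonempty `rows`
-- B calls it on: getD's default is never reached below the minimum length)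
def pvZipStar (rows : List (List Int)) : List (List Int) :=
  (List.range (((rows.map List.length).min?).getD 0)).map (fun i => rows.map (fun r => r.getD i 0))

def generate_n_configs_alt (config : List (String × List Int)) (n : Int) : List (List (String × Int)) :=
  let keys := config.map Prod.fst
  if keys.isEmpty then (PySem.List.pyRange 0 n 1).map (fun _ => [])
  else
    let m := max n 0
    let rows := config.map (fun kv => pvRow m kv.2)
    (pvZipStar rows).map (fun col =>
      ((keys.zip col).foldl (fun d p => d.insert p.1 p.2) (PySem.Dict.empty : PySem.Dict String Int)).items)

-- ===== PRECONDITION & SPEC =====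
-- Pre_ excludes exactly the inputs where A raises IndexError: some value list has length ≠ 1
-- and shorter than n (A reads v[i] for i < n); for n ≤ 0 no element is read.
def Pre_generate_n_configs (config : List (String × List Int)) (n : Int) : Prop :=
  n ≤ 0 ∨ ∀ kv ∈ config, kv.2.length = 1 ∨ n ≤ (kv.2.length : Int)
instance (config : List (String × List Int)) (n : Int) : Decidable (Pre_generate_n_configs config n) := by unfold Pre_generate_n_configs; infer_instance

def pvWitness_generate_n_configs : (List (String × List Int)) × Int := ([("a", [1]), ("b", [5, 6])], 2)

def Spec_generate_n_configs (config : List (String × List Int)) (n : Int) (out : List (List (String × Int))) : Prop := out = generate_n_configs_alt config n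
instance (config : List (String × List Int)) (n : Int) (out : List (List (String × Int))) : Decidable (Spec_generate_n_configs config n out) := by unfold Spec_generate_n_configs; infer_instance

-- ===== CLAIM (what is proved, stated in full; the proofs are below) =====
def Claim_equal_generate_n_configs : Prop := ∀ (config : List (String × List Int)) (n : Int), Dom_generate_n_configs config n → Pre_generate_n_configs config n → Spec_generate_n_configs config n (generate_n_configs config n)

-- ===== LEMMAS AND PROOFS =====

-- the value A assigns to key k of dict i (and the value in B's column i for that key)
def pvVal (v : List Int) (i : Int) : Int :=
  if v.length = 1 then (PySem.List.pyGet? v 0).getD 0 else (PySem.List.pyGet? v i).getD 0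

theorem pv_set_map_range {α : Type} (M j : Nat) (f : Nat → α) (v : α) (_hj : j < M) :
    ((List.range M).map f).set j v = (List.range M).map (fun i => if i = j then v else f i) := by
  apply List.ext_getElem
  · simp
  · intro k h1 h2
    simp only [List.getElem_set, List.getElem_map, List.getElem_range]
    by_cases hk : j = k
    · simp [hk]
    · rw [if_neg hk, if_neg (Ne.symm hk)]

theorem pv_min?_replicate (k a : Nat) : (List.replicate (k+1) a).min? = some a := by
  induction k with
  | zero => simp
  | succ k ih =>
    rw [List.replicate_succ, List.min?_cons]
    rw [List.replicate_succ, List.min?_cons] at ih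
    simp_all

-- the inner `for i in range(n)` loop, after range is cast to Nat indices
theorem pv_inner (kv : String × List Int) (M : Nat) :
    ∀ (m : Nat), m ≤ M → ∀ (g : Nat → PySem.Dict String Int),
    (List.range m).foldl
      (fun ds (j : Nat) => PySem.List.pySetD ds (j : Int)
        ((PySem.List.pyGetD ds (j : Int) PySem.Dict.empty).insert kv.1 (pvVal kv.2 (j : Int))))
      ((List.range M).map g)
    = (List.range M).map (fun j => if j < m then (g j).insert kv.1 (pvVal kv.2 (j : Int)) else g j) := by
  intro m
  induction m with
  | zero => intro _ g; simp
  | succ m ih =>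
    intro hm g
    rw [List.range_succ, List.foldl_append, ih (by omega) g]
    simp only [List.foldl_cons, List.foldl_nil]
    rw [PySem.List.pyGetD_natCast, PySem.List.pySetD_natCast,
        List.getD_eq_getElem?_getD, List.getElem?_map, List.getElem?_range (by omega : m < M)]
    simp only [Option.map_some, Option.getD_some, if_neg (lt_irrefl m)]
    rw [pv_set_map_range M m _ _ (by omega)]
    apply List.map_congr_left
    intro a ha
    rw [List.mem_range] at ha
    by_cases h1 : a = m
    · subst h1; simp
    · by_cases h2 : a < m <;> simp [h1, h2] <;> omega

-- the whole nested loop of A: dict i is the fold of the per-key inserts over config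
theorem pv_outer (config : List (String × List Int)) (M : Nat) :
    ∀ (g : Nat → PySem.Dict String Int),
    config.foldl
      (fun ds kv => (List.range M).foldl
        (fun ds (j : Nat) => PySem.List.pySetD ds (j : Int)
          ((PySem.List.pyGetD ds (j : Int) PySem.Dict.empty).insert kv.1 (pvVal kv.2 (j : Int))))
        ds)
      ((List.range M).map g)
    = (List.range M).map
        (fun j => config.foldl (fun d kv => d.insert kv.1 (pvVal kv.2 (j : Int))) (g j)) := by
  induction config with
  | nil => intro g; simp
  | cons kv tl ih =>
    intro g
    simp only [List.foldl_cons]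
    rw [pv_inner kv M M (le_refl M) g, List.map_congr_left
      (fun a ha => by rw [List.mem_range] at ha; simp [ha] :
        ∀ a ∈ List.range M, (if a < M then (g a).insert kv.1 (pvVal kv.2 (a : Int)) else g a)
          = (g a).insert kv.1 (pvVal kv.2 (a : Int))), ih]

-- A's step function (with the `if` around the whole assignment) is the pvVal form
theorem pv_stepA_eq (kv : String × List Int) :
    (fun (ds : List (PySem.Dict String Int)) (i : Int) =>
      let d := PySem.List.pyGetD ds i PySem.Dict.empty
      let d' := if kv.2.length = 1
        then d.insert kv.1 ((PySem.List.pyGet? kv.2 0).getD 0)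
        else d.insert kv.1 ((PySem.List.pyGet? kv.2 i).getD 0)
      PySem.List.pySetD ds i d')
    = (fun ds i => PySem.List.pySetD ds i
        ((PySem.List.pyGetD ds i PySem.Dict.empty).insert kv.1 (pvVal kv.2 i))) := by
  funext ds i
  by_cases h : kv.2.length = 1 <;> simp [pvVal, h]

-- A in canonical form
theorem pv_A_eq (config : List (String × List Int)) (n : Int) :
    generate_n_configs config n
    = (List.range n.toNat).map
        (fun j => (config.foldl (fun d kv => d.insert kv.1 (pvVal kv.2 (j : Int)))
          (PySem.Dict.empty : PySem.Dict String Int)).items) := by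
  unfold generate_n_configs
  simp only [PySem.List.pyRange_one, Int.sub_zero, List.map_map]
  have hcast : (fun k : Nat => (0 : Int) + k) = (fun k : Nat => (k : Int)) := by
    funext k; omega
  rw [hcast]
  have : ∀ ds, config.foldl
      (fun ds kv => ((List.range n.toNat).map (fun k : Nat => (k : Int))).foldl
        (fun ds i =>
          let d := PySem.List.pyGetD ds i PySem.Dict.empty
          let d' := if kv.2.length = 1
            then d.insert kv.1 ((PySem.List.pyGet? kv.2 0).getD 0)
            else d.insert kv.1 ((PySem.List.pyGet? kv.2 i).getD 0)
          PySem.List.pySetD ds i d')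
        ds)
      ds
    = config.foldl
      (fun ds kv => (List.range n.toNat).foldl
        (fun ds (j : Nat) => PySem.List.pySetD ds (j : Int)
          ((PySem.List.pyGetD ds (j : Int) PySem.Dict.empty).insert kv.1 (pvVal kv.2 (j : Int))))
        ds)
      ds := by
    intro ds
    apply PySem.List.foldl_congr_mem
    intro a b _
    rw [pv_stepA_eq b, List.foldl_map]
  simp only [Function.comp_def]
  rw [this, pv_outer config n.toNat (fun _ => PySem.Dict.empty), List.map_map]
  rfl

-- each of B's rows has length exactly n.toNat under Pre_ (n > 0 case)
theorem pv_row_len (n : Int) (v : List Int) (hv : v.length = 1 ∨ n ≤ (v.length : Int)) :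
    (pvRow (max n 0) v).length = n.toNat := by
  unfold pvRow
  by_cases h : v.length = 1
  · simp [h, List.length_flatten]
    omega
  · rcases hv with hv | hv
    · exact absurd hv h
    · rw [if_neg h]
      have h0 : (0 : Int) ≤ max n 0 := le_max_right n 0
      rw [PySem.List.slice_to v h0, List.length_take]
      omega

-- B's column entry = the value A assigns (n > 0 case)
theorem pv_row_get (n : Int) (v : List Int) (hv : v.length = 1 ∨ n ≤ (v.length : Int))
    (i : Nat) (hi : i < n.toNat) :
    (pvRow (max n 0) v).getD i 0 = pvVal v (i : Int) := by
  unfold pvRow pvVal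
  by_cases h : v.length = 1
  · obtain ⟨x, hx⟩ := List.length_eq_one_iff.mp h
    subst hx
    rw [if_pos h, if_pos h, List.flatten_replicate_singleton]
    rw [List.getD_eq_getElem?_getD, List.getElem?_replicate]
    simp only [PySem.List.pyGet?_zero_cons, Option.getD_some]
    rw [if_pos (by omega)]
    simp
  · rcases hv with hv | hv
    · exact absurd hv h
    · rw [if_neg h, if_neg h]
      have h0 : (0 : Int) ≤ max n 0 := le_max_right n 0
      rw [PySem.List.slice_to v h0, List.getD_eq_getElem?_getD,
          List.getElem?_take_of_lt (by omega), PySem.List.pyGet?_natCast]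

-- ===== VERDICT (by name: the statement is the Claim_ definition above) =====
theorem generate_n_configs_spec : Claim_equal_generate_n_configs := by
  intro config n _hdom hpre
  unfold Spec_generate_n_configs
  rw [pv_A_eq]
  by_cases hc : config = []
  · subst hc
    simp [generate_n_configs_alt, PySem.List.pyRange_one, Function.comp_def,
      List.map_const', PySem.Dict.empty]
  · have hkeys : (config.map Prod.fst).isEmpty = false := by
      simp [hc]
    simp only [generate_n_configs_alt, hkeys, Bool.false_eq_true, if_false]
    by_cases hn : n ≤ 0
    -- n ≤ 0 : both sides are []
    · have hn0 : n.toNat = 0 := by omega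
      have hm0 : max n 0 = 0 := by omega
      have hrows : config.map (fun kv => pvRow (max n 0) kv.2) = config.map (fun _ => []) := by
        apply List.map_congr_left
        intro kv _
        unfold pvRow
        rw [hm0]
        by_cases h : kv.2.length = 1
        · simp [h]
        · rw [if_neg h, PySem.List.slice_to kv.2 (le_refl (0:Int))]
          simp
      rw [hrows, hn0]
      unfold pvZipStar
      obtain ⟨kv0, tl, rfl⟩ := List.exists_cons_of_ne_nil hc
      have hlen0 : ((kv0 :: tl).map (fun (_ : String × List Int) => ([] : List Int))).map List.length
          = List.replicate (tl.length + 1) 0 := by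
        simp [List.map_const', List.replicate_succ]
      rw [hlen0, pv_min?_replicate]
      simp
    -- n > 0 : both sides are the canonical map over range n.toNat
    · have hpre' : ∀ kv ∈ config, kv.2.length = 1 ∨ n ≤ (kv.2.length : Int) := by
        rcases hpre with h | h
        · omega
        · exact h
      have hlens : (config.map (fun kv => pvRow (max n 0) kv.2)).map List.length
          = List.replicate config.length n.toNat := by
        rw [List.map_map]
        have hcg := List.map_congr_left
          (f := List.length ∘ fun kv : String × List Int => pvRow (max n 0) kv.2)
          (g := fun _ => n.toNat)
          (fun kv hkv => pv_row_len n kv.2 (hpre' kv hkv))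
        rw [hcg, List.map_const']
      unfold pvZipStar
      rw [hlens]
      obtain ⟨kv0, tl, rfl⟩ := List.exists_cons_of_ne_nil hc
      rw [List.length_cons, pv_min?_replicate, Option.getD_some, List.map_map]
      apply List.map_congr_left
      intro i hi
      rw [List.mem_range] at hi
      simp only [Function.comp_def]
      have hcol : (kv0 :: tl).map ((fun r => r.getD i 0) ∘ (fun kv => pvRow (max n 0) kv.2))
          = (kv0 :: tl).map (fun kv => pvVal kv.2 (i : Int)) :=
        List.map_congr_left (fun kv hkv => pv_row_get n kv.2 (hpre' kv hkv) i hi)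
      rw [List.map_map]
      simp only [Function.comp_def] at hcol ⊢
      rw [hcol, List.zip_map', List.foldl_map]
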